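-- pv_equiv track=rewrite | github.com/bandnee/ski-neelima | startiks/Session-4-recursion-Geetha/Homework1-Recursion/checkPalin.py | gpd
-- ===== SOURCE A (Python) =====
-- def gpd(s,start):
--     if start == len(s):
--         return ([""])
--     inlist = gpd(s,start+1)
--     final_list = []
--     for pstr in inlist:
--         #print ("coming here")
--         if (start !=0):
--             final_list.append("|" + s[start] + pstr)
--         final_list.append(s[start] + pstr)
--     return final_list
-- ===== SOURCE B (Python) =====
-- def gpd(s, start):
--     result = [""]
--     for i in range(len(s) - 1, start - 1, -1):
--         prefixes = ["|" + s[i], s[i]] if i != 0 else [s[i]]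
--         result = [p + pstr for pstr in result for p in prefixes]
--     return result
-- ===== Notes on version B (the rewrite author's own statement) =====
-- stated objective: alternative
-- what changed: Replaced the top-down recursion on start with an explicit bottom-up loop over indices len(s)-1..start that rebuilds the variant list from [""], choosing the prefix list per index and combining by a comprehension.
import Mathlib
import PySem

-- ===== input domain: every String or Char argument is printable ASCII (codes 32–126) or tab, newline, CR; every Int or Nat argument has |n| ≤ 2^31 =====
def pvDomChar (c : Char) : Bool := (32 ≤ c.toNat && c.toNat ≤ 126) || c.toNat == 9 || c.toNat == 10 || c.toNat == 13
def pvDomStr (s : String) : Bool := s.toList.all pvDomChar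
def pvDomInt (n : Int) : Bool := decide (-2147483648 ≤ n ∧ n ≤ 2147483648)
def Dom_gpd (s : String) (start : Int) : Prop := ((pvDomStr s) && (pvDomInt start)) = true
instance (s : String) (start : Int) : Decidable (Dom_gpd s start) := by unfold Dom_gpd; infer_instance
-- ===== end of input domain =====

-- B replaces A's top-down recursion on `start` by a bottom-up loop over the indices
-- len(s)-1 .. start that rebuilds the variant list from [""] (objective: alternative,
-- same cost; return-value equivalence only, neither version mutates its arguments).

-- ===== PORT A =====
-- Literal port of A's recursion; the final `else []` branch is a totality guard for
-- start > len(s), where the Python recursion never terminates (outside Pre_gpd).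
def gpdAuxA (cs : List Char) (start : Int) : List String :=
  if start = (cs.length : Int) then [""]
  else if _h : start < (cs.length : Int) then
    let inlist := gpdAuxA cs (start + 1)
    let c := ((PySem.List.pyGet? cs start).getD ' ').toString
    inlist.foldl (fun fl pstr =>
      (fl ++ (if start ≠ 0 then ["|" ++ c ++ pstr] else [])) ++ [c ++ pstr]) []
  else []
termination_by ((cs.length : Int) - start).toNat
decreasing_by omega

def gpd (s : String) (start : Int) : List String := gpdAuxA s.toList start

-- ===== PORT B =====
-- the body of Source B's for-loop: prefixes for index i, combined by the comprehension
def pvStepB (cs : List Char) (result : List String) (i : Int) : List String :=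
  let c := ((PySem.List.pyGet? cs i).getD ' ').toString
  let prefixes := if i ≠ 0 then ["|" ++ c, c] else [c]
  result.flatMap (fun pstr => prefixes.map (fun p => p ++ pstr))

def gpd_alt (s : String) (start : Int) : List String :=
  (PySem.List.pyRange ((s.toList.length : Int) - 1) (start - 1) (-1)).foldl
    (pvStepB s.toList) [""]

-- ===== PRECONDITION & SPEC =====
-- Pre_ excludes exactly the inputs where A raises: start > len(s) (unbounded recursion,
-- RecursionError) and start < -len(s) (IndexError); A returns on all of -len ≤ start ≤ len.
def Pre_gpd (s : String) (start : Int) : Prop :=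
  -(s.toList.length : Int) ≤ start ∧ start ≤ (s.toList.length : Int)
instance (s : String) (start : Int) : Decidable (Pre_gpd s start) := by
  unfold Pre_gpd; infer_instance

def pvWitness_gpd : String × Int := ("ab", 1)

def Spec_gpd (s : String) (start : Int) (out : List String) : Prop := out = gpd_alt s start
instance (s : String) (start : Int) (out : List String) : Decidable (Spec_gpd s start out) := by
  unfold Spec_gpd; infer_instance

-- ===== CLAIM (what is proved, stated in full; the proofs are below) =====
def Claim_equal_gpd : Prop := ∀ (s : String) (start : Int),
  Dom_gpd s start → Pre_gpd s start → Spec_gpd s start (gpd s start)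

-- ===== LEMMAS AND PROOFS =====
lemma pvStepB_eq (cs : List Char) (a : Int) (ha : a < (cs.length : Int)) :
    pvStepB cs (gpdAuxA cs (a + 1)) a = gpdAuxA cs a := by
  conv_rhs => rw [gpdAuxA]
  rw [if_neg (by omega), dif_pos ha]
  simp only [pvStepB, List.append_assoc]
  rw [PySem.List.foldl_append_eq_flatMap]
  rw [List.nil_append]
  congr 1
  funext pstr
  by_cases h0 : a = 0 <;> simp [h0]

lemma pvLoopB (cs : List Char) : ∀ (k : Nat) (a j : Int), (a + 1 - j).toNat = k →
    j ≤ a + 1 → a < (cs.length : Int) →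
    (PySem.List.pyRange a (j - 1) (-1)).foldl (pvStepB cs) (gpdAuxA cs (a + 1))
      = gpdAuxA cs j := by
  intro k
  induction k with
  | zero =>
    intro a j hk hj ha
    have hje : j = a + 1 := by omega
    rw [PySem.List.pyRange_neg_one_eq_nil (by omega)]
    rw [List.foldl_nil, hje]
  | succ k ih =>
    intro a j hk hj ha
    rw [PySem.List.pyRange_neg_one_cons (by omega : j - 1 < a)]
    rw [List.foldl_cons, pvStepB_eq cs a ha]
    rw [show gpdAuxA cs a = gpdAuxA cs (a - 1 + 1) from congrArg _ (by ring)]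
    exact ih (a - 1) j (by omega) (by omega) (by omega)

-- ===== VERDICT (by name: the statement is the Claim_ definition above) =====
theorem gpd_spec : Claim_equal_gpd := by
  intro s start _ hpre
  unfold Pre_gpd at hpre
  unfold Spec_gpd gpd gpd_alt
  have hbase : gpdAuxA s.toList ((s.toList.length : Int) - 1 + 1) = [""] := by
    rw [show ((s.toList.length : Int) - 1 + 1) = (s.toList.length : Int) by ring]
    rw [gpdAuxA]; simp
  rw [← hbase]
  exact (pvLoopB s.toList ((s.toList.length : Int) - 1 + 1 - start).toNat
    ((s.toList.length : Int) - 1) start rfl (by omega) (by omega)).symm
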